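-- pv_equiv track=rewrite | github.com/Wulfic/Cicada3301 | LiberPrimus/tools/try_full_corpus_key.py | text_to_rune_indices
-- ===== SOURCE A (Python) =====
-- RUNE_MAP = {
--     'F': 0, 'U': 1, 'TH': 2, 'O': 3, 'R': 4, 'C': 5, 'G': 6, 'W': 7,
--     'H': 8, 'N': 9, 'I': 10, 'J': 11, 'EO': 12, 'P': 13, 'X': 14, 'S': 15,
--     'T': 16, 'B': 17, 'E': 18, 'M': 19, 'L': 20, 'NG': 21, 'OE': 22, 'D': 23,
--     'A': 24, 'AE': 25, 'Y': 26, 'IA': 27, 'EA': 28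
-- }
--
-- def text_to_rune_indices(text):
--     text = text.upper()
--     indices = []
--     i = 0
--     while i < len(text):
--         c = text[i]
--         if not c.isalpha():
--             i += 1
--             continue
--
--         # Check 2-char combos
--         if i + 1 < len(text):
--             pair = text[i:i+2]
--             if pair in RUNE_MAP:
--                 indices.append(RUNE_MAP[pair])
--                 i += 2
--                 continue
--
--         # Check 1-char
--         if c in RUNE_MAP:
--             indices.append(RUNE_MAP[c])
--         elif c == 'K': indices.append(RUNE_MAP['C'])
--         elif c == 'V': indices.append(RUNE_MAP['U'])
--         elif c == 'Z': indices.append(RUNE_MAP['S'])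
--         elif c == 'Q': indices.append(RUNE_MAP['C'])
--         i += 1
--     return indices
-- ===== SOURCE B (Python) =====
-- RUNE_MAP = {
--     'F': 0, 'U': 1, 'TH': 2, 'O': 3, 'R': 4, 'C': 5, 'G': 6, 'W': 7,
--     'H': 8, 'N': 9, 'I': 10, 'J': 11, 'EO': 12, 'P': 13, 'X': 14, 'S': 15,
--     'T': 16, 'B': 17, 'E': 18, 'M': 19, 'L': 20, 'NG': 21, 'OE': 22, 'D': 23,
--     'A': 24, 'AE': 25, 'Y': 26, 'IA': 27, 'EA': 28
-- }
--
-- DIGRAPHS = ('TH', 'EO', 'NG', 'OE', 'IA', 'EA', 'AE')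
-- LETTERS = set('ABCDEFGHIJKLMNOPQRSTUVWXYZ')
-- # one table: RUNE_MAP plus the phonetic fallbacks K->C, V->U, Z->S, Q->C
-- COMBINED = {**RUNE_MAP, 'K': 5, 'V': 1, 'Z': 15, 'Q': 5}
--
--
-- def text_to_rune_indices(text):
--     # one-pass automaton: remember at most one pending letter; a digraph is
--     # recognised when the next letter completes it, otherwise the pending
--     # letter is flushed as a single rune.
--     out = []
--     pending = None
--     for c in text.upper():
--         if c not in LETTERS:
--             if pending is not None:
--                 out.append(COMBINED[pending])
--                 pending = None
--         elif pending is not None and pending + c in DIGRAPHS: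
--             out.append(COMBINED[pending + c])
--             pending = None
--         else:
--             if pending is not None:
--                 out.append(COMBINED[pending])
--             pending = c
--     if pending is not None:
--         out.append(COMBINED[pending])
--     return out
-- ===== Notes on version B (the rewrite author's own statement) =====
-- stated objective: alternative
-- what changed: Replaces A's index-jumping greedy matcher (2-char slice lookahead, two-stage dict + elif fallback chain) by a one-pass automaton that keeps a single pending-letter state, completes digraphs from it, and uses one combined lookup table.
import Mathlib
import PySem

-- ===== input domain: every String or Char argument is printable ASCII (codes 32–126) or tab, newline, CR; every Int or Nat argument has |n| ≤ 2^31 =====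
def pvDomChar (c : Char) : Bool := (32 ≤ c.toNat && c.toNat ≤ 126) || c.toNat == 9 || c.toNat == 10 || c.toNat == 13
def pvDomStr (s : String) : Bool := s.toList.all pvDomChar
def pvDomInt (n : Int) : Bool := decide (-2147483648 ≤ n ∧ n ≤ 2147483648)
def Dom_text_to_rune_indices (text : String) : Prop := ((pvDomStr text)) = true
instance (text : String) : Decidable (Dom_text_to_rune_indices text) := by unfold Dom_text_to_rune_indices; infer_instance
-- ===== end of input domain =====

set_option maxRecDepth 100000
set_option maxHeartbeats 2000000

-- B replaces A's index-jumping greedy matcher by a one-pass automaton with a single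
-- pending-letter state and one combined lookup table (objective: alternative; same O(n) cost).

-- ===== PORT A =====
-- RUNE_MAP, keyed by the rune's letter group (Python str keys ported as List Char)
def runeMap : PySem.Dict (List Char) Int := PySem.Dict.mk [(['F'], 0), (['U'], 1), (['T', 'H'], 2), (['O'], 3), (['R'], 4), (['C'], 5), (['G'], 6), (['W'], 7), (['H'], 8), (['N'], 9), (['I'], 10), (['J'], 11), (['E', 'O'], 12), (['P'], 13), (['X'], 14), (['S'], 15), (['T'], 16), (['B'], 17), (['E'], 18), (['M'], 19), (['L'], 20), (['N', 'G'], 21), (['O', 'E'], 22), (['D'], 23), (['A'], 24), (['A', 'E'], 25), (['Y'], 26), (['I', 'A'], 27), (['E', 'A'], 28)]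

-- the 1-char branch of A's loop (RUNE_MAP['C'] etc. ported as lookups; the keys are present)
def singleAdd (c : Char) : List Int :=
  match PySem.Dict.get? runeMap [c] with
  | some v => [v]
  | none =>
    if c = 'K' then [(PySem.Dict.get? runeMap ['C']).getD 0]
    else if c = 'V' then [(PySem.Dict.get? runeMap ['U']).getD 0]
    else if c = 'Z' then [(PySem.Dict.get? runeMap ['S']).getD 0]
    else if c = 'Q' then [(PySem.Dict.get? runeMap ['C']).getD 0]
    else []

-- the while-loop of A: index i over the uppercased text, greedy 2-char lookahead
def loopA (cs : List Char) (i : Nat) (acc : List Int) : List Int :=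
  if h : i < cs.length then
    let c := cs[i]
    if PySem.Chars.isalpha c = false then loopA cs (i + 1) acc
    else
      -- check 2-char combos: pair = text[i:i+2]
      match (if i + 1 < cs.length then PySem.Dict.get? runeMap ((cs.drop i).take 2) else none) with
      | some v => loopA cs (i + 2) (acc ++ [v])
      | none => loopA cs (i + 1) (acc ++ singleAdd c)
  else acc
termination_by cs.length - i
decreasing_by all_goals omega

def text_to_rune_indices (text : String) : List Int :=
  loopA (PySem.Chars.upper text.toList) 0 []

-- ===== PORT B =====
def DIGRAPHS : List (List Char) := [['T', 'H'], ['E', 'O'], ['N', 'G'], ['O', 'E'], ['I', 'A'], ['E', 'A'], ['A', 'E']]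
def LETTERS : List Char := PySem.Set.ofList ['A', 'B', 'C', 'D', 'E', 'F', 'G', 'H', 'I', 'J', 'K', 'L', 'M', 'N', 'O', 'P', 'Q', 'R', 'S', 'T', 'U', 'V', 'W', 'X', 'Y', 'Z']
-- COMBINED = {**RUNE_MAP, 'K': 5, 'V': 1, 'Z': 15, 'Q': 5}
def combinedMap : PySem.Dict (List Char) Int := PySem.Dict.mk [(['F'], 0), (['U'], 1), (['T', 'H'], 2), (['O'], 3), (['R'], 4), (['C'], 5), (['G'], 6), (['W'], 7), (['H'], 8), (['N'], 9), (['I'], 10), (['J'], 11), (['E', 'O'], 12), (['P'], 13), (['X'], 14), (['S'], 15), (['T'], 16), (['B'], 17), (['E'], 18), (['M'], 19), (['L'], 20), (['N', 'G'], 21), (['O', 'E'], 22), (['D'], 23), (['A'], 24), (['A', 'E'], 25), (['Y'], 26), (['I', 'A'], 27), (['E', 'A'], 28), (['K'], 5), (['V'], 1), (['Z'], 15), (['Q'], 5)]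

-- COMBINED[t]; every token B emits is a key, so the default is never used
def lookupB (t : List Char) : Int := (PySem.Dict.get? combinedMap t).getD 0

-- the loop body of B: state = (out, pending)
def stepB (st : List Int × Option Char) (c : Char) : List Int × Option Char :=
  match st with
  | (out, pending) =>
    if c ∉ LETTERS then
      match pending with
      | some p => (out ++ [lookupB [p]], none)
      | none => (out, none)
    else
      match pending with
      | some p =>
        if [p, c] ∈ DIGRAPHS then (out ++ [lookupB [p, c]], none)
        else (out ++ [lookupB [p]], some c)
      | none => (out, some c)

def text_to_rune_indices_alt (text : String) : List Int :=
  let st := (PySem.Chars.upper text.toList).foldl stepB ([], none)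
  match st.2 with
  | some p => st.1 ++ [lookupB [p]]
  | none => st.1

-- ===== PRECONDITION & SPEC =====
def Spec_text_to_rune_indices (text : String) (out : List Int) : Prop := out = text_to_rune_indices_alt text
instance (text : String) (out : List Int) : Decidable (Spec_text_to_rune_indices text out) := by unfold Spec_text_to_rune_indices; infer_instance

-- ===== CLAIM (what is proved, stated in full; the proofs are below) =====
def Claim_equal_text_to_rune_indices : Prop := ∀ (text : String), Dom_text_to_rune_indices text → Spec_text_to_rune_indices text (text_to_rune_indices text)

-- ===== LEMMAS AND PROOFS =====

-- the characters a Dom string can contain after .upper(): tab/newline/CR and printable ASCII minus lowercase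
def UP : List Char := ['\t', '\n', '\r', ' ', '!', '"', '#', '$', '%', '&', '\'', '(', ')', '*', '+', ',', '-', '.', '/', '0', '1', '2', '3', '4', '5', '6', '7', '8', '9', ':', ';', '<', '=', '>', '?', '@', 'A', 'B', 'C', 'D', 'E', 'F', 'G', 'H', 'I', 'J', 'K', 'L', 'M', 'N', 'O', 'P', 'Q', 'R', 'S', 'T', 'U', 'V', 'W', 'X', 'Y', 'Z', '[', '\\', ']', '^', '_', '`', '{', '|', '}', '~']

def DOMNATS : List Nat := [9, 10, 13, 32, 33, 34, 35, 36, 37, 38, 39, 40, 41, 42, 43, 44, 45, 46, 47, 48, 49, 50, 51, 52, 53, 54, 55, 56, 57, 58, 59, 60, 61, 62, 63, 64, 65, 66, 67, 68, 69, 70, 71, 72, 73, 74, 75, 76, 77, 78, 79, 80, 81, 82, 83, 84, 85, 86, 87, 88, 89, 90, 91, 92, 93, 94, 95, 96, 97, 98, 99, 100, 101, 102, 103, 104, 105, 106, 107, 108, 109, 110, 111, 112, 113, 114, 115, 116, 117, 118, 119, 120, 121, 122, 123, 124, 125, 126]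

-- B run from pending state p on the rest of the text, final pending flushed
def runB (p : Option Char) (l : List Char) : List Int :=
  let st := l.foldl stepB ([], p)
  match st.2 with
  | some q => st.1 ++ [lookupB [q]]
  | none => st.1

theorem natMem_DOMNATS (n : Nat) (h : (32 ≤ n ∧ n ≤ 126) ∨ n = 9 ∨ n = 10 ∨ n = 13) :
    n ∈ DOMNATS := by
  rcases h with ⟨h1, h2⟩ | h | h | h
  · interval_cases n <;> decide
  all_goals subst h; decide

theorem upperChar_mem_UP (c : Char) (h : pvDomChar c = true) : PySem.Chars.upperChar c ∈ UP := by
  have hmem : c ∈ DOMNATS.map Char.ofNat := by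
    simp only [pvDomChar, Bool.or_eq_true, Bool.and_eq_true, decide_eq_true_eq, beq_iff_eq] at h
    refine List.mem_map.2 ⟨c.toNat, natMem_DOMNATS c.toNat ?_, Char.ofNat_toNat c⟩
    rcases h with ((h1 | h2) | h3) | h4
    · exact Or.inl h1
    · exact Or.inr (Or.inl h2)
    · exact Or.inr (Or.inr (Or.inl h3))
    · exact Or.inr (Or.inr (Or.inr h4))
  have hall : (DOMNATS.map Char.ofNat).all (fun c => decide (PySem.Chars.upperChar c ∈ UP)) = true := by rfl
  simpa using List.all_eq_true.mp hall c hmem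

theorem alpha_iff_letter (c : Char) (hc : c ∈ UP) :
    PySem.Chars.isalpha c = decide (c ∈ LETTERS) := by
  have hall : UP.all (fun c => PySem.Chars.isalpha c == decide (c ∈ LETTERS)) = true := by rfl
  simpa using List.all_eq_true.mp hall c hc

theorem pair_lookup (c : Char) (hc : c ∈ LETTERS) (c2 : Char) (hc2 : c2 ∈ UP) :
    PySem.Dict.get? runeMap [c, c2] =
      (if [c, c2] ∈ DIGRAPHS then some (lookupB [c, c2]) else none) := by
  have hall : LETTERS.all (fun c => UP.all (fun c2 =>
      PySem.Dict.get? runeMap [c, c2] ==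
        (if [c, c2] ∈ DIGRAPHS then some (lookupB [c, c2]) else none))) = true := by rfl
  have h1 := List.all_eq_true.mp hall c hc
  simpa using List.all_eq_true.mp h1 c2 hc2

theorem single_lookup (c : Char) (hc : c ∈ LETTERS) : singleAdd c = [lookupB [c]] := by
  have hall : LETTERS.all (fun c => singleAdd c == [lookupB [c]]) = true := by rfl
  simpa using List.all_eq_true.mp hall c hc

theorem dig_second_letter (c c2 : Char) (h : [c, c2] ∈ DIGRAPHS) : c2 ∈ LETTERS := by
  simp only [DIGRAPHS, List.mem_cons, List.cons.injEq, List.not_mem_nil, or_false] at h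
  rcases h with ⟨h1, h2, -⟩ | ⟨h1, h2, -⟩ | ⟨h1, h2, -⟩ | ⟨h1, h2, -⟩ | ⟨h1, h2, -⟩ | ⟨h1, h2, -⟩ | ⟨h1, h2, -⟩ <;>
    subst h2 <;> decide

theorem foldl_stepB_append (l : List Char) : ∀ st : List Int × Option Char,
    l.foldl stepB st = (st.1 ++ (l.foldl stepB ([], st.2)).1, (l.foldl stepB ([], st.2)).2) := by
  induction l with
  | nil => intro st; simp
  | cons c l ih =>
    intro st
    have h1 : (stepB st c).1 = st.1 ++ (stepB ([], st.2) c).1 := by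
      rcases st with ⟨out, p⟩
      unfold stepB; rcases p with _ | p' <;> dsimp only <;> split_ifs <;> simp
    have h2 : (stepB st c).2 = (stepB ([], st.2) c).2 := by
      rcases st with ⟨out, p⟩
      unfold stepB; rcases p with _ | p' <;> dsimp only <;> split_ifs <;> simp
    simp only [List.foldl_cons]
    rw [ih (stepB st c), ih (stepB ([], st.2) c), h1, h2]
    simp

theorem runB_cons_append (p : Option Char) (c : Char) (l : List Char) :
    runB p (c :: l) = (stepB ([], p) c).1 ++ runB (stepB ([], p) c).2 l := by
  unfold runB
  simp only [List.foldl_cons]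
  rw [foldl_stepB_append l (stepB ([], p) c)]
  rcases hh : (l.foldl stepB ([], (stepB ([], p) c).2)).2 with _ | q <;> simp

theorem runB_pending (c : Char) (l : List Char)
    (hl : ∀ c2 l', l = c2 :: l' → [c, c2] ∉ DIGRAPHS) :
    runB (some c) l = lookupB [c] :: runB none l := by
  cases l with
  | nil => simp [runB]
  | cons c2 l' =>
    rw [runB_cons_append (some c) c2 l', runB_cons_append none c2 l']
    have hnd : [c, c2] ∉ DIGRAPHS := hl c2 l' rfl
    by_cases h2 : c2 ∈ LETTERS
    · simp [stepB, h2, hnd]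
    · simp [stepB, h2]

theorem loopA_eq_runB (cs : List Char) (hcs : ∀ c ∈ cs, c ∈ UP) :
    ∀ i acc, loopA cs i acc = acc ++ runB none (cs.drop i) := by
  intro i acc
  induction i, acc using loopA.induct cs with
  | case1 i acc h c hal ih =>
    have hal' : PySem.Chars.isalpha cs[i] = false := hal
    rw [loopA, dif_pos h, if_pos hal', ih]
    have hc : cs[i] ∈ UP := hcs _ (List.getElem_mem h)
    have hna : cs[i] ∉ LETTERS := by
      have h' := alpha_iff_letter cs[i] hc
      rw [hal'] at h'
      simpa using h'.symm
    conv_rhs => rw [← List.getElem_cons_drop (h := h)]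
    rw [runB_cons_append]
    have hstep : stepB ([], none) cs[i] = ([], none) := by simp [stepB, hna]
    rw [hstep]
    rfl
  | case2 i acc h c hal v hv ih =>
    have hal' : ¬ PySem.Chars.isalpha cs[i] = false := hal
    rw [dite_eq_ite] at hv
    rw [loopA, dif_pos h, if_neg hal', hv]
    show loopA cs (i + 2) (acc ++ [v]) = acc ++ runB none (cs.drop i)
    rw [ih]
    have h2 : i + 1 < cs.length := by
      by_contra hle
      rw [if_neg hle] at hv
      cases hv
    rw [if_pos h2] at hv
    have hpair : (cs.drop i).take 2 = [cs[i], cs[i + 1]] := by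
      rw [← List.getElem_cons_drop (h := Nat.lt_of_succ_lt h2),
          ← List.getElem_cons_drop (h := h2)]
      simp only [List.take_succ_cons, List.take_zero]
    rw [hpair] at hv
    have hc : cs[i] ∈ UP := hcs _ (List.getElem_mem h)
    have hcl : cs[i] ∈ LETTERS := by
      have h' := alpha_iff_letter cs[i] hc
      rw [show PySem.Chars.isalpha cs[i] = true from by simpa using hal'] at h'
      simpa using h'.symm
    have hc2 : cs[i + 1] ∈ UP := hcs _ (List.getElem_mem h2)
    have hdig := pair_lookup cs[i] hcl cs[i + 1] hc2
    rw [hv] at hdig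
    have hmem : [cs[i], cs[i + 1]] ∈ DIGRAPHS := by
      by_contra hnm
      rw [if_neg hnm] at hdig
      cases hdig
    rw [if_pos hmem] at hdig
    have hval : v = lookupB [cs[i], cs[i + 1]] := by
      exact Option.some.inj hdig
    have h2l : cs[i + 1] ∈ LETTERS := dig_second_letter _ _ hmem
    conv_rhs => rw [← List.getElem_cons_drop (h := h), ← List.getElem_cons_drop (h := h2)]
    rw [runB_cons_append]
    have hstep1 : stepB ([], none) cs[i] = ([], some cs[i]) := by simp [stepB, hcl]
    rw [hstep1]
    dsimp only
    rw [runB_cons_append]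
    have hstep2 : stepB ([], some cs[i]) cs[i + 1] = ([lookupB [cs[i], cs[i + 1]]], none) := by
      simp [stepB, h2l, hmem]
    rw [hstep2]
    simp [hval]
  | case3 i acc h c hal hv ih =>
    have hal' : ¬ PySem.Chars.isalpha cs[i] = false := hal
    rw [dite_eq_ite] at hv
    rw [loopA, dif_pos h, if_neg hal', hv]
    show loopA cs (i + 1) (acc ++ singleAdd cs[i]) = acc ++ runB none (cs.drop i)
    rw [ih]
    have hc : cs[i] ∈ UP := hcs _ (List.getElem_mem h)
    have hcl : cs[i] ∈ LETTERS := by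
      have h' := alpha_iff_letter cs[i] hc
      rw [show PySem.Chars.isalpha cs[i] = true from by simpa using hal'] at h'
      simpa using h'.symm
    rw [single_lookup cs[i] hcl]
    conv_rhs => rw [← List.getElem_cons_drop (h := h)]
    rw [runB_cons_append]
    have hstep1 : stepB ([], none) cs[i] = ([], some cs[i]) := by simp [stepB, hcl]
    rw [hstep1]
    dsimp only
    have hpend : runB (some cs[i]) (cs.drop (i + 1)) =
        lookupB [cs[i]] :: runB none (cs.drop (i + 1)) := by
      apply runB_pending
      intro c2 l' hdrop hmem
      have h2 : i + 1 < cs.length := by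
        by_contra hle
        have hnil : cs.drop (i + 1) = [] := List.drop_eq_nil_of_le (by omega)
        rw [hnil] at hdrop; cases hdrop
      have hc2v : cs[i + 1] = c2 := by
        rw [← List.getElem_cons_drop (h := h2)] at hdrop
        exact (List.cons.injEq _ _ _ _ ▸ hdrop).1
      have hc2 : cs[i + 1] ∈ UP := hcs _ (List.getElem_mem h2)
      have hlk := pair_lookup cs[i] hcl cs[i + 1] hc2
      rw [hc2v, if_pos hmem] at hlk
      rw [if_pos h2] at hv
      have hpair : (cs.drop i).take 2 = [cs[i], cs[i + 1]] := by
        rw [← List.getElem_cons_drop (h := Nat.lt_of_succ_lt h2),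
            ← List.getElem_cons_drop (h := h2)]
        simp only [List.take_succ_cons, List.take_zero]
      rw [hpair, hc2v, hlk] at hv
      cases hv
    rw [hpend]
    simp
  | case4 i acc h =>
    rw [loopA, dif_neg h]
    rw [List.drop_eq_nil_of_le (by omega)]
    simp [runB]

-- ===== VERDICT (by name: the statement is the Claim_ definition above) =====
theorem text_to_rune_indices_spec : Claim_equal_text_to_rune_indices := by
  intro text hdom
  unfold Spec_text_to_rune_indices text_to_rune_indices text_to_rune_indices_alt
  have hup : ∀ c ∈ PySem.Chars.upper text.toList, c ∈ UP := by
    intro c hc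
    rw [show PySem.Chars.upper text.toList = text.toList.map PySem.Chars.upperChar from by
      simp [PySem.Chars.upper]] at hc
    rcases List.mem_map.1 hc with ⟨d, hd, he⟩
    have hdc : pvDomChar d = true := by
      have hD := hdom
      unfold Dom_text_to_rune_indices pvDomStr at hD
      exact List.all_eq_true.mp hD d hd
    rw [← he]
    exact upperChar_mem_UP d hdc
  rw [loopA_eq_runB _ hup 0 []]
  simp [runB]
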